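-- pv_equiv track=rewrite | github.com/Lee-YunChang/pythonAlgorithm | fount2.py | min_score_difference
-- ===== SOURCE A (Python) =====
-- def min_score_difference(grade):
--     origin_grade_sum = sum(grade)
--
--     for i in reversed(range(1, len(grade))):
--         if grade[i] > grade[i-1]:
--             continue
--         else:
--             grade[i-1] = grade[i]
--
--     sorted_grade_sum= sum(grade)
--
--     return origin_grade_sum - sorted_grade_sum
-- ===== SOURCE B (Python) =====
-- def min_score_difference(grade):
--     # Monotonic-stack algorithm: a left-to-right pass popping every stacked
--     # index whose value is >= the incoming one leaves exactly the
--     # right-to-left strict minima; each survivor k owns the segment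
--     # (previous survivor, k], whose suffix minimum is grade[k].  The answer
--     # is the sum of (grade[i] - segment minimum), and grade is rewritten
--     # into the suffix-minimum array segment by segment, as in the original.
--     stack = []
--     for i, v in enumerate(grade):
--         while stack and grade[stack[-1]] >= v:
--             stack.pop()
--         stack.append(i)
--     total = 0
--     lo = 0
--     for k in stack:
--         m = grade[k]
--         for i in range(lo, k + 1):
--             total += grade[i] - m
--             grade[i] = m
--         lo = k + 1
--     return total
-- ===== Notes on version B (the rewrite author's own statement) =====
-- stated objective: alternative
-- what changed: Replaces A's backward neighbour-propagation plus two sum() passes with a left-to-right monotonic-stack algorithm: the stack's surviving indices are the right-to-left strict minima, and the answer and the suffix-minimum rewrite of grade are produced segment by segment between consecutive survivors.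
import Mathlib
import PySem

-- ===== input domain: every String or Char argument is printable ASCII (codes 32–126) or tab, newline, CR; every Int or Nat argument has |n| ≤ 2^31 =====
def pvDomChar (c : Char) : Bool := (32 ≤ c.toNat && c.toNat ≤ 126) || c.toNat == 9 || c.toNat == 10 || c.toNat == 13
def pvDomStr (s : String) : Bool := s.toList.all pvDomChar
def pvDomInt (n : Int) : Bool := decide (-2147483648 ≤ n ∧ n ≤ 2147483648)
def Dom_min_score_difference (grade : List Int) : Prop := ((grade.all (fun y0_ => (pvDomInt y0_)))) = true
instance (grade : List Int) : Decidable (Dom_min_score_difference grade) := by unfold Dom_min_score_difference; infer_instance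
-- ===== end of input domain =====

-- B replaces A's backward neighbour-propagation with a left-to-right monotonic-stack
-- algorithm (survivors = right-to-left strict minima, answer summed segment-wise);
-- both Pythons mutate `grade` into the same suffix-minimum array in place — the
-- theorems here are about the RETURN value (Lean lists are immutable).

-- ===== PORT A =====
-- loop body: indices i satisfy 1 ≤ i < len(grade), so plain getD is exact for grade[i]/grade[i-1]
def pvStepA (g : List Int) (i : Int) : List Int :=
  if g.getD i.toNat 0 > g.getD (i.toNat - 1) 0 then g
  else g.set (i.toNat - 1) (g.getD i.toNat 0)

def min_score_difference (grade : List Int) : Int :=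
  let origin_grade_sum := grade.sum
  let g := ((PySem.List.pyRange 1 (grade.length : Int) 1).reverse).foldl pvStepA grade
  origin_grade_sum - g.sum

-- ===== PORT B =====
-- the Lean stack keeps the TOP AT THE HEAD (Python appends/pops at the list's end);
-- `while stack and grade[stack[-1]] >= v: stack.pop()`
def pvPop (g : List Int) (v : Int) : List Nat → List Nat
  | [] => []
  | k :: s => if v ≤ g.getD k 0 then pvPop g v s else k :: s

-- `for i, v in enumerate(grade): …; stack.append(i)` — indices are the naturals
-- 0..len-1 and v = grade[i], read before any mutation
def pvStack (g : List Int) : List Nat :=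
  (List.range g.length).foldl (fun s i => i :: pvPop g (g.getD i 0) s) []

-- one segment of phase 2: state = (lo, total); `for i in range(lo, k+1): total += grade[i]-m`
-- (the write grade[i] = m touches only cells no later read visits, so reads stay on g)
def pvSeg (g : List Int) (st : Nat × Int) (k : Nat) : Nat × Int :=
  let m := g.getD k 0
  (k + 1, (List.range' st.1 (k + 1 - st.1)).foldl (fun t i => t + (g.getD i 0 - m)) st.2)

def min_score_difference_alt (grade : List Int) : Int :=
  -- `for k in stack` walks the Python stack bottom→top = our list reversed
  ((pvStack grade).reverse.foldl (pvSeg grade) ((0 : Nat), (0 : Int))).2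

-- ===== PRECONDITION & SPEC =====
def Spec_min_score_difference (grade : List Int) (out : Int) : Prop := out = min_score_difference_alt grade
instance (grade : List Int) (out : Int) : Decidable (Spec_min_score_difference grade out) := by unfold Spec_min_score_difference; infer_instance

-- ===== CLAIM (what is proved, stated in full; the proofs are below) =====
def Claim_equal_min_score_difference : Prop := ∀ (grade : List Int), Dom_min_score_difference grade → Spec_min_score_difference grade (min_score_difference grade)

-- ===== LEMMAS AND PROOFS =====

-- reference: the suffix-minimum array both programs compute the sum-drop of
def sufMin : List Int → List Int
  | [] => []
  | x :: xs =>
    match sufMin xs with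
    | [] => [x]
    | y :: ys => (min x y) :: y :: ys

theorem sufMin_length (xs : List Int) : (sufMin xs).length = xs.length := by
  induction xs with
  | nil => rfl
  | cons x xs ih =>
    unfold sufMin
    cases h : sufMin xs with
    | nil =>
      rw [h] at ih
      cases xs with
      | nil => rfl
      | cons a as => simp at ih
    | cons y ys =>
      rw [h] at ih
      simpa using ih

theorem sufMin_append_pair (ys : List Int) (u v : Int) :
    sufMin (ys ++ [min u v]) ++ [v] = sufMin (ys ++ [u, v]) := by
  induction ys with
  | nil => simp [sufMin]
  | cons x ys ih =>
    have hne : sufMin (ys ++ [min u v]) ≠ [] := by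
      intro h
      have := sufMin_length (ys ++ [min u v])
      simp [h] at this
    have hne' : sufMin (ys ++ [u, v]) ≠ [] := by
      intro h
      have := sufMin_length (ys ++ [u, v])
      simp [h] at this
    obtain ⟨a, as, ha⟩ := List.exists_cons_of_ne_nil hne
    obtain ⟨b, bs, hb⟩ := List.exists_cons_of_ne_nil hne'
    have hih : (a :: as) ++ [v] = b :: bs := by rw [← ha, ← hb]; exact ih
    have hab : a = b := by simpa using congrArg (List.head? ·) hih
    have htail : as ++ [v] = bs := by
      have := congrArg List.tail hih
      simpa using this
    show sufMin (x :: (ys ++ [min u v])) ++ [v] = sufMin (x :: (ys ++ [u, v]))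
    simp only [sufMin, ha, hb, hab, ← htail]
    simp

-- === A-side: the backward propagation loop turns grade into sufMin grade ===

def pvLoopA (k : Nat) (h : List Int) : List Int :=
  (((List.range k).map (fun j : Nat => (1 : Int) + (j : Int))).reverse).foldl pvStepA h

theorem pvLoopA_succ (k : Nat) (h : List Int) :
    pvLoopA (k + 1) h = pvLoopA k (pvStepA h (1 + (k : Int))) := by
  unfold pvLoopA
  rw [List.range_succ, List.map_append, List.reverse_append]
  simp

theorem pvLoopA_spec (k : Nat) (h : List Int) (hk : k < h.length) :
    pvLoopA k h = sufMin (h.take (k + 1)) ++ h.drop (k + 1) := by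
  induction k generalizing h with
  | zero =>
    cases h with
    | nil => simp at hk
    | cons a t => simp [pvLoopA, sufMin]
  | succ k ih =>
    rw [pvLoopA_succ]
    have hk1 : k + 1 < h.length := hk
    have hkk : k < h.length := by omega
    have hu : h.getD k 0 = h[k] := List.getD_eq_getElem h 0 hkk
    have hv : h.getD (k + 1) 0 = h[k + 1] := List.getD_eq_getElem h 0 hk1
    have hstep : pvStepA h (1 + (k : Int)) = h.set k (min h[k] h[k + 1]) := by
      unfold pvStepA
      have h1 : ((1 : Int) + k).toNat = k + 1 := by omega
      rw [h1]
      simp only [Nat.add_sub_cancel, hu, hv]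
      split
      · next hgt =>
        have hm : min h[k] h[k + 1] = h[k] := min_eq_left (le_of_lt hgt)
        rw [hm, List.set_getElem_self]
      · next hle =>
        have hm : min h[k] h[k + 1] = h[k + 1] := min_eq_right (by omega)
        rw [hm]
    rw [hstep]
    have hlen : k < (h.set k (min h[k] h[k + 1])).length := by simpa using hkk
    rw [ih _ hlen]
    have hset : h.set k (min h[k] h[k + 1]) =
        h.take k ++ (min h[k] h[k + 1]) :: h.drop (k + 1) := by
      rw [List.set_eq_take_append_cons_drop]
      simp [hkk]
    have hmin : min k h.length = k := Nat.min_eq_left (le_of_lt hkk)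
    have hdrop : (h.set k (min h[k] h[k + 1])).drop (k + 1) = h.drop (k + 1) := by
      rw [hset]
      simp [List.drop_append, hmin]
    have htake : (h.set k (min h[k] h[k + 1])).take (k + 1) =
        h.take k ++ [min h[k] h[k + 1]] := by
      rw [hset]
      simp [List.take_append, hmin, List.take_take]
    have hdropc : h.drop (k + 1) = h[k + 1] :: h.drop (k + 1 + 1) :=
      List.drop_eq_getElem_cons hk1
    have htake2 : h.take (k + 1 + 1) = h.take k ++ [h[k], h[k + 1]] := by
      have e2 : h.take (k + 1) = h.take k ++ [h[k]] := by
        rw [List.take_add_one]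
        simp [List.getElem?_eq_getElem hkk]
      have e1 : h.take (k + 1 + 1) = h.take (k + 1) ++ [h[k + 1]] := by
        rw [List.take_add_one]
        simp [List.getElem?_eq_getElem hk1]
      rw [e1, e2, List.append_assoc]
      rfl
    rw [hdrop, hdropc, htake, htake2]
    rw [show (h[k + 1] :: h.drop (k + 1 + 1)) = [h[k + 1]] ++ h.drop (k + 1 + 1) from rfl]
    rw [← List.append_assoc, sufMin_append_pair]

theorem a_eq_sufMin (grade : List Int) :
    ((PySem.List.pyRange 1 (grade.length : Int) 1).reverse).foldl pvStepA grade =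
      sufMin grade := by
  cases grade with
  | nil => simp [sufMin]
  | cons a t =>
    rw [PySem.List.pyRange_one]
    have hlen : (((a :: t).length : Int) - 1).toNat = t.length := by simp
    rw [hlen]
    have hspec := pvLoopA_spec t.length (a :: t) (by simp)
    unfold pvLoopA at hspec
    rw [hspec]
    simp

-- === B-side: stack coverage, decoding into segments, validity ===

-- the prefix [0, pvCov s) of indices a stack covers
def pvCov : List Nat → Nat
  | [] => 0
  | k :: _ => k + 1

-- the suffix-minimum array a stack encodes: each entry owns the segment down to
-- the next (deeper) entry
def pvDecode (g : List Int) : List Nat → List Int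
  | [] => []
  | k :: r => pvDecode g r ++ List.replicate (k + 1 - pvCov r) (g.getD k 0)

-- indices and values strictly decrease towards the bottom of the stack
def pvValid (g : List Int) (s : List Nat) : Prop :=
  s.Pairwise (fun a b => b < a ∧ g.getD b 0 < g.getD a 0)

@[simp] theorem pvCov_nil : pvCov [] = 0 := rfl
@[simp] theorem pvCov_cons (k : Nat) (r : List Nat) : pvCov (k :: r) = k + 1 := rfl
@[simp] theorem pvDecode_nil (g : List Int) : pvDecode g [] = [] := rfl
theorem pvDecode_cons (g : List Int) (k : Nat) (r : List Nat) :
    pvDecode g (k :: r) = pvDecode g r ++ List.replicate (k + 1 - pvCov r) (g.getD k 0) := rfl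

theorem pvPop_subset (g : List Int) (v : Int) (s : List Nat) :
    ∀ j ∈ pvPop g v s, j ∈ s := by
  induction s with
  | nil => simp [pvPop]
  | cons k r ih =>
    intro j hj
    unfold pvPop at hj
    split at hj
    · exact List.mem_cons_of_mem _ (ih j hj)
    · exact hj

theorem pvPop_valid (g : List Int) (v : Int) (s : List Nat) (h : pvValid g s) :
    pvValid g (pvPop g v s) := by
  induction s with
  | nil => simpa [pvPop] using h
  | cons k r ih =>
    unfold pvPop
    split
    · exact ih (List.Pairwise.of_cons h)
    · exact h

theorem pvPop_val_lt (g : List Int) (v : Int) (s : List Nat) (h : pvValid g s) :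
    ∀ j ∈ pvPop g v s, g.getD j 0 < v := by
  induction s with
  | nil => simp [pvPop]
  | cons k r ih =>
    intro j hj
    unfold pvPop at hj
    split at hj
    · exact ih (List.Pairwise.of_cons h) j hj
    · next hkeep =>
      rcases List.mem_cons.mp hj with rfl | hjr
      · omega
      · have := (List.pairwise_cons.mp h).1 j hjr
        omega

theorem pvValid_push (g : List Int) (n : Nat) (s : List Nat) (h : pvValid g s)
    (hlt : ∀ j ∈ s, j < n) :
    pvValid g (n :: pvPop g (g.getD n 0) s) := by
  refine List.pairwise_cons.mpr ⟨?_, pvPop_valid g _ s h⟩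
  intro j hj
  exact ⟨hlt j (pvPop_subset g _ s j hj), pvPop_val_lt g _ s h j hj⟩

theorem pvDecode_mem (g : List Int) (s : List Nat) :
    ∀ x ∈ pvDecode g s, ∃ k ∈ s, x = g.getD k 0 := by
  induction s with
  | nil => simp [pvDecode]
  | cons k r ih =>
    intro x hx
    unfold pvDecode at hx
    rcases List.mem_append.mp hx with hx | hx
    · obtain ⟨k', hk', he⟩ := ih x hx
      exact ⟨k', List.mem_cons_of_mem _ hk', he⟩
    · exact ⟨k, List.mem_cons_self, (List.eq_of_mem_replicate hx)⟩

theorem pvCov_tail_le (g : List Int) (k : Nat) (r : List Nat)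
    (h : pvValid g (k :: r)) : pvCov r ≤ k := by
  cases r with
  | nil => simp [pvCov]
  | cons k' r' =>
    have := (List.pairwise_cons.mp h).1 k' List.mem_cons_self
    simpa [pvCov] using this.1

-- popping then pushing index n updates the decoded suffix-minimum array exactly
-- like appending g[n]: old entries are clamped by min, and the tail becomes g[n]
theorem pop_decode (g : List Int) (n : Nat) (s : List Nat) (h : pvValid g s)
    (hcov : pvCov s ≤ n) :
    pvDecode g (n :: pvPop g (g.getD n 0) s)
      = (pvDecode g s).map (fun x => min x (g.getD n 0))
        ++ List.replicate (n + 1 - pvCov s) (g.getD n 0) := by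
  induction s with
  | nil => simp [pvPop, pvDecode_cons]
  | cons k r ih =>
    have hk1 : k + 1 ≤ n := by simpa using hcov
    have hcr : pvCov r ≤ k := pvCov_tail_le g k r h
    unfold pvPop
    split
    · next hpop =>
      rw [ih (List.Pairwise.of_cons h) (by omega)]
      have hmin : min (g.getD k 0) (g.getD n 0) = g.getD n 0 := min_eq_right hpop
      rw [pvDecode_cons g k r, List.map_append, List.map_replicate, hmin, List.append_assoc,
        List.replicate_append_replicate, pvCov_cons]
      congr 2
      omega
    · next hkeep =>
      have hid : (pvDecode g (k :: r)).map (fun x => min x (g.getD n 0))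
          = pvDecode g (k :: r) := by
        rw [List.map_congr_left, List.map_id]
        intro x hx
        obtain ⟨j, hj, rfl⟩ := pvDecode_mem g (k :: r) x hx
        rcases List.mem_cons.mp hj with rfl | hjr
        · exact min_eq_left (by omega)
        · have := (List.pairwise_cons.mp h).1 j hjr
          exact min_eq_left (by omega)
      rw [pvDecode_cons g n (k :: r), hid]

-- appending one value to the input clamps the suffix-minimum array and appends it
theorem sufMin_snoc (p : List Int) (v : Int) :
    sufMin (p ++ [v]) = (sufMin p).map (fun x => min x v) ++ [v] := by
  induction p with
  | nil => simp [sufMin]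
  | cons x p ih =>
    cases h : sufMin p with
    | nil =>
      have hlen := sufMin_length p
      rw [h] at hlen
      have : p = [] := by
        cases p with
        | nil => rfl
        | cons a as => simp at hlen
      subst this
      simp [sufMin]
    | cons y ys =>
      have h2 : sufMin (x :: p) = min x y :: y :: ys := by
        unfold sufMin; rw [h]
      have h3 : sufMin (p ++ [v]) = min y v :: (ys.map (fun t => min t v) ++ [v]) := by
        rw [ih, h]; simp
      have h4 : sufMin (x :: (p ++ [v]))
          = min x (min y v) :: min y v :: (ys.map (fun t => min t v) ++ [v]) := by
        unfold sufMin; rw [h3]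
      rw [List.cons_append, h4, h2]
      simp only [List.map_cons, List.cons_append, min_assoc]

-- the stack after processing the first n elements
def pvStackN (g : List Int) (n : Nat) : List Nat :=
  (List.range n).foldl (fun s i => i :: pvPop g (g.getD i 0) s) []

theorem pvStackN_inv (g : List Int) (n : Nat) (hn : n ≤ g.length) :
    pvValid g (pvStackN g n) ∧ pvCov (pvStackN g n) = n ∧
      (∀ j ∈ pvStackN g n, j < n) ∧ pvDecode g (pvStackN g n) = sufMin (g.take n) := by
  induction n with
  | zero => simp [pvStackN, pvValid, pvCov, sufMin]
  | succ n ih =>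
    obtain ⟨hval, hcov, hmem, hdec⟩ := ih (by omega)
    have hstep : pvStackN g (n + 1) = n :: pvPop g (g.getD n 0) (pvStackN g n) := by
      unfold pvStackN
      rw [List.range_succ, List.foldl_append]
      rfl
    have hnl : n < g.length := by omega
    refine ⟨?_, ?_, ?_, ?_⟩
    · rw [hstep]; exact pvValid_push g n _ hval hmem
    · rw [hstep]; rfl
    · rw [hstep]
      intro j hj
      rcases List.mem_cons.mp hj with rfl | hj
      · omega
      · exact lt_trans (hmem j (pvPop_subset g _ _ j hj)) (by omega)
    · rw [hstep, pop_decode g n _ hval (by omega), hdec, hcov]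
      have ht : g.take (n + 1) = g.take n ++ [g[n]] := by
        rw [List.take_add_one]
        simp [List.getElem?_eq_getElem hnl]
      rw [ht, sufMin_snoc]
      have : n + 1 - n = 1 := by omega
      rw [this, List.replicate_one, List.getD_eq_getElem g 0 hnl]

-- the inner accumulation loop of one segment, in closed form
theorem pvSeg_inner (g : List Int) (m : Int) :
    ∀ (c lo : Nat) (t : Int),
      (List.range' lo c).foldl (fun t i => t + (g.getD i 0 - m)) t
        = t + ((List.range' lo c).map (fun i => g.getD i 0)).sum - (c : Int) * m := by
  intro c
  induction c with
  | zero => intro lo t; simp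
  | succ c ih =>
    intro lo t
    rw [List.range'_succ, List.foldl_cons, ih]
    simp only [List.map_cons, List.sum_cons]
    push_cast
    ring

-- phase 2 over the whole stack (bottom→top = foldr on our top-first list)
theorem phase2 (g : List Int) (s : List Nat) (h : pvValid g s) (t0 : Int) :
    s.foldr (fun k st => pvSeg g st k) ((0 : Nat), t0)
      = (pvCov s,
         t0 + ((List.range' 0 (pvCov s)).map (fun i => g.getD i 0)).sum
           - (pvDecode g s).sum) := by
  induction s with
  | nil => simp
  | cons k r ih =>
    have hcr : pvCov r ≤ k := pvCov_tail_le g k r h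
    rw [List.foldr_cons, ih (List.Pairwise.of_cons h)]
    show (k + 1, (List.range' (pvCov r) (k + 1 - pvCov r)).foldl
        (fun t i => t + (g.getD i 0 - g.getD k 0))
        (t0 + ((List.range' 0 (pvCov r)).map (fun i => g.getD i 0)).sum - (pvDecode g r).sum))
      = _
    rw [pvSeg_inner]
    have hsplit : List.range' 0 (pvCov (k :: r))
        = List.range' 0 (pvCov r) ++ List.range' (pvCov r) (k + 1 - pvCov r) := by
      have h0 : List.range' 0 (pvCov r) ++ List.range' (0 + pvCov r) (k + 1 - pvCov r)
          = List.range' 0 (pvCov r + (k + 1 - pvCov r)) := List.range'_append_1 ..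
      rw [pvCov_cons, show k + 1 = pvCov r + (k + 1 - pvCov r) from by omega, ← h0,
        Nat.zero_add, show pvCov r + (k + 1 - pvCov r) - pvCov r = k + 1 - pvCov r from by omega]
    refine Prod.ext rfl ?_
    show _ = t0 + ((List.range' 0 (pvCov (k :: r))).map (fun i => g.getD i 0)).sum
        - (pvDecode g (k :: r)).sum
    rw [hsplit, List.map_append, List.sum_append, pvDecode_cons,
      List.sum_append, List.sum_replicate, nsmul_eq_mul]
    push_cast
    ring

theorem range'_map_getD (g : List Int) :
    (List.range' 0 g.length).map (fun i => g.getD i 0) = g := by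
  apply List.ext_getElem
  · simp
  · intro i h1 h2
    simp [List.getElem?_eq_getElem h2]

-- ===== VERDICT (by name: the statement is the Claim_ definition above) =====
theorem min_score_difference_spec : Claim_equal_min_score_difference := by
  intro grade _
  unfold Spec_min_score_difference min_score_difference min_score_difference_alt
  obtain ⟨hval, hcov, _, hdec⟩ := pvStackN_inv grade grade.length le_rfl
  show grade.sum - _ = _
  rw [a_eq_sufMin]
  show _ = ((pvStack grade).reverse.foldl (pvSeg grade) ((0 : Nat), (0 : Int))).2
  rw [List.foldl_reverse]
  have hs : pvStack grade = pvStackN grade grade.length := rfl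
  rw [hs, phase2 grade _ hval 0, hcov, hdec, range'_map_getD, List.take_length]
  ring
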